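-- pv_equiv track=rewrite | github.com/jerry81/Project-Euler-Solutions | src/euler61.py | allInSet
-- ===== SOURCE A (Python) =====
-- def allInSet(setC, inputs):
--   resultMap = {}
--   for num in inputs:
--     for idx, s in enumerate(setC):
--       if checkMap(num, s):
--         if checkMap(num, resultMap):
--           resultMap[num].append(idx)
--           resultMap[num] = list(set(resultMap[num]))
--         else:
--           resultMap[num] = [idx]
--   return resultMap
--
-- def checkMap(num, _map):
--   value = _map.get(num, None)
--   if value is not None:
--     return True
--   return False
-- ===== SOURCE B (Python) =====
-- def allInSet(setC, inputs):
--   buckets = {}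
--   for idx, s in enumerate(setC):
--     for key in s:
--       buckets.setdefault(key, []).append(idx)
--   result = {}
--   for num in inputs:
--     if num not in result and num in buckets:
--       result[num] = buckets[num]
--   return result
-- ===== Notes on version B (the rewrite author's own statement) =====
-- stated objective: alternative
-- what changed: A scans every set once per input element with repeated dict membership tests and list(set()) deduplication; B makes one pass over the sets bucketing each key to its ascending index list, then one pass over inputs reading the finished buckets.
-- outside the precondition, e.g. on allInSet([{}, {5: 0}, {}, {}, {}, {}, {}, {}, {5: 0}], [5]): A returns {5: [8, 1]}, B returns {5: [1, 8]}
import Mathlib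
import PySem

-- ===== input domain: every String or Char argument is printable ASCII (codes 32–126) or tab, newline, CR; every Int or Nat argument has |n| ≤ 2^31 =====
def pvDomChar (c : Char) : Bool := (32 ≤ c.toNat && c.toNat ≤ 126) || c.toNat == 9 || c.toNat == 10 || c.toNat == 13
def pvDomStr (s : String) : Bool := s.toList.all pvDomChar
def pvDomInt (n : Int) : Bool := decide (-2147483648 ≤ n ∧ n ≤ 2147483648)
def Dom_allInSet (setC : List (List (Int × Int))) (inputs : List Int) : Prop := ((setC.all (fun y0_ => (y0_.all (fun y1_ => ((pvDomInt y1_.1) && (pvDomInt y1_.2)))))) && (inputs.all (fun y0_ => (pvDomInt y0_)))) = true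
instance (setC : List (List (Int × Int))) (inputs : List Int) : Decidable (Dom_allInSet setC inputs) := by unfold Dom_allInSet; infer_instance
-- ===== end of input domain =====

-- B replaces A's per-input scan over all sets by one bucketing pass over the sets' keys followed by one
-- pass over inputs (a different loop nesting and an asymptotically smaller amount of work).


-- ===== PORT A =====
-- helper checkMap of the Python module (values here are ints / lists, never None, so the
-- 'is not None' test is exactly 'the key is present')
def checkMap {ν : Type} (num : Int) (m : PySem.Dict Int ν) : Bool :=
  match PySem.Dict.get? m num with
  | some _ => true
  | none => false

-- 'list(set(xs))' for the nonnegative set-index lists this program feeds it: an open-addressing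
-- model of CPython's int set (hash(i) = i, a power-of-two table scanned slot by slot). It is exact
-- exactly where Pre_allInSet holds — all distinct elements below 8 land in their own slot of the
-- ≥ 8-slot table, so iteration is ascending, as in CPython; collision probing and table sizing are
-- simplified, so OUTSIDE Pre_allInSet no claim is made about the order.
def pySetProbe (t : List (Option Int)) (v : Int) (sz : Nat) : Nat → Nat → List (Option Int)
  | _, 0 => t
  | i, fuel + 1 =>
    match t[i]? with
    | some none => t.set i (some v)
    | some (some w) => if w = v then t else pySetProbe t v sz ((i + 1) % sz) fuel
    | none => t

def pySetList (xs : List Int) : List Int :=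
  let sz := 8 * 2 ^ (xs.length / 4)
  (xs.foldl (fun t v => pySetProbe t v sz ((v % (sz : Int)).toNat) sz)
    (List.replicate sz none)).filterMap id

-- the body of A's inner 'for idx, s in enumerate(setC)' loop, for a fixed num;
-- resultMap[num] after 'if checkMap(num, resultMap)' is read with getD (the key is present there)
def stepA (num : Int) (resultMap : PySem.Dict Int (List Int)) (p : Int × List (Int × Int)) :
    PySem.Dict Int (List Int) :=
  if checkMap num (PySem.Dict.mk p.2) then
    if checkMap num resultMap then
      resultMap.insert num (pySetList (resultMap.getD num [] ++ [p.1]))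
    else
      resultMap.insert num [p.1]
  else resultMap

def allInSet (setC : List (List (Int × Int))) (inputs : List Int) : List (Int × List Int) :=
  (inputs.foldl (fun resultMap num => (PySem.List.enumerate setC).foldl (stepA num) resultMap)
    PySem.Dict.empty).items

-- ===== PORT B =====
-- 'for key in s' over the dict s (assoc list) = its keys, first occurrences in order
def stepB (buckets : PySem.Dict Int (List Int)) (p : Int × List (Int × Int)) :
    PySem.Dict Int (List Int) :=
  (PySem.List.dedup (p.2.map Prod.fst)).foldl
    (fun b key => b.modify key [] (· ++ [p.1])) buckets

def allInSet_alt (setC : List (List (Int × Int))) (inputs : List Int) : List (Int × List Int) :=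
  let buckets := (PySem.List.enumerate setC).foldl stepB PySem.Dict.empty
  (inputs.foldl (fun result num =>
      if !(result.contains num) && buckets.contains num then
        result.insert num (buckets.getD num [])   -- buckets[num]; the key is present (contains holds)
      else result)
    PySem.Dict.empty).items

-- ===== PRECONDITION & SPEC =====
-- Pre_ excludes setC with more than 8 sets: there A's index lists come out in CPython's
-- set-iteration order, which for indices ≥ 8 need not be ascending (list(set([1, 8])) is [8, 1]) —
-- a hash-table tie-order corner no caller would specify; B's lists are always in ascending index order.
def Pre_allInSet (setC : List (List (Int × Int))) (inputs : List Int) : Prop :=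
  setC.length ≤ 8
instance (setC : List (List (Int × Int))) (inputs : List Int) : Decidable (Pre_allInSet setC inputs) := by unfold Pre_allInSet; infer_instance

def pvWitness_allInSet : (List (List (Int × Int))) × List Int :=
  ([[(1, 2)], [], [(3, 4), (1, 5)]], [1, 3, 7, 1])

def Spec_allInSet (setC : List (List (Int × Int))) (inputs : List Int) (out : List (Int × List Int)) : Prop := out = allInSet_alt setC inputs
instance (setC : List (List (Int × Int))) (inputs : List Int) (out : List (Int × List Int)) : Decidable (Spec_allInSet setC inputs out) := by unfold Spec_allInSet; infer_instance

-- ===== CLAIM (what is proved, stated in full; the proofs are below) =====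
def Claim_equal_allInSet : Prop := ∀ (setC : List (List (Int × Int))) (inputs : List Int), Dom_allInSet setC inputs → Pre_allInSet setC inputs → Spec_allInSet setC inputs (allInSet setC inputs)

-- ===== LEMMAS AND PROOFS =====

-- the list of indices of sets (in an enumerated list E) containing num — the value both folds store
def matchIdx (E : List (Int × List (Int × Int))) (num : Int) : List Int :=
  (E.filter (fun p => checkMap num (PySem.Dict.mk p.2))).map (·.1)

-- the common canonical outer loop both ports are reduced to
def stepC (E : List (Int × List (Int × Int))) (r : PySem.Dict Int (List Int)) (num : Int) :
    PySem.Dict Int (List Int) :=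
  if matchIdx E num = [] then r else r.insert num (matchIdx E num)

theorem matchIdx_cons (p : Int × List (Int × Int)) (E : List (Int × List (Int × Int))) (num : Int) :
    matchIdx (p :: E) num =
      if checkMap num (PySem.Dict.mk p.2) then p.1 :: matchIdx E num else matchIdx E num := by
  simp only [matchIdx, List.filter_cons]
  split <;> simp

theorem matchIdx_sublist (E : List (Int × List (Int × Int))) (num : Int) :
    (matchIdx E num).Sublist (E.map (·.1)) := by
  simpa [matchIdx] using List.Sublist.map (·.1) (List.filter_sublist (l := E))

theorem matchIdx_nodup (E : List (Int × List (Int × Int))) (num : Int)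
    (hE : (E.map (·.1)).Nodup) : (matchIdx E num).Nodup :=
  hE.sublist (matchIdx_sublist E num)

theorem checkMap_true_iff {ν : Type} (num : Int) (m : PySem.Dict Int ν) :
    checkMap num m = true ↔ (m.get? num).isSome := by
  unfold checkMap
  cases m.get? num <;> simp

theorem checkMap_isSome {ν : Type} (num : Int) (m : PySem.Dict Int ν) :
    checkMap num m = (m.get? num).isSome := by
  unfold checkMap; cases m.get? num <;> simp

-- membership in the raw assoc list's keys decides checkMap on Dict.mk
theorem get?_mk_isSome (s : List (Int × Int)) (num : Int) :
    ((PySem.Dict.mk s).get? num).isSome = true ↔ num ∈ s.map Prod.fst := by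
  induction s with
  | nil => simp [PySem.Dict.get?]
  | cons q t ih =>
    rw [PySem.Dict.get?_mk_cons]
    by_cases h : q.1 = num
    · simp [h]
    · simp only [List.map_cons, List.mem_cons]
      rw [if_neg (by simpa using h), ih]
      constructor
      · exact Or.inr
      · rintro (h' | h')
        · exact absurd h'.symm h
        · exact h'

theorem checkMap_mk_iff (s : List (Int × Int)) (num : Int) :
    checkMap num (PySem.Dict.mk s) = true ↔ num ∈ s.map Prod.fst := by
  rw [checkMap_true_iff]
  exact get?_mk_isSome s num

-- a Set built from a duplicate-free list is that list
theorem ofList_nodup_self (l : List Int) (h : l.Nodup) : PySem.Set.ofList l = l := by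
  have h2 : PySem.Set.update ([] : PySem.Set Int) l = [] ++ l :=
    PySem.Set.update_eq_append_of_disjoint _ l h (by simp)
  rw [← PySem.Set.update_nil_left]
  simpa using h2

theorem ofList_append_singleton (l : List Int) (x : Int) (h : l.Nodup) :
    PySem.Set.ofList (l ++ [x]) = PySem.Set.add l x := by
  rw [PySem.Set.ofList_eq_foldl, List.foldl_append]
  have : l.foldl PySem.Set.add [] = PySem.Set.ofList l := (PySem.Set.ofList_eq_foldl l).symm
  simp [this, ofList_nodup_self l h]

-- updating a duplicate-free set with itself changes nothing
theorem update_self (s : List Int) : PySem.Set.update s s = s := by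
  rw [PySem.Set.update_eq_append_filter]
  have h0 : (List.filter (fun y => !(PySem.Set.contains s y)) (PySem.Set.ofList s)) = [] := by
    apply List.filter_eq_nil_iff.mpr
    intro a ha
    simpa using (PySem.Set.mem_ofList s a).mp ha
  simp

-- overwriting a key with the value it already holds is the identity
theorem insert_eq_self (d : PySem.Dict Int (List Int)) (k : Int) (v : List Int)
    (hnd : d.keys.Nodup) (h : d.get? k = some v) : d.insert k v = d := by
  apply PySem.Dict.ext
  have hc : d.contains k = true := by
    rw [PySem.Dict.contains_eq_isSome_get?, h]; rfl
  rw [PySem.Dict.items_insert_of_contains _ _ hc]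
  have hcong : ∀ p ∈ d.items, (if (p.1 == k) = true then (k, v) else p) = id p := by
    intro p hp
    by_cases hk : (p.1 == k) = true
    · have hk' : p.1 = k := by simpa using hk
      have hg := PySem.Dict.get?_of_mem_items _ hp hnd
      rw [hk', h] at hg
      have hv : p.2 = v := by injection hg.symm
      simp [← hk', ← hv]
    · simp [hk]
  rw [List.map_congr_left hcong, List.map_id]

-- ===== the int-set model =====

-- the table holding exactly the elements of S, each in its own slot (the shape every insertion
-- of values < 8 preserves)
def canonTbl (sz : Nat) (S : List Int) : List (Option Int) :=
  (List.range sz).map (fun j : Nat => if (j : Int) ∈ S then some (j : Int) else none)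

theorem canonTbl_empty (sz : Nat) : canonTbl sz [] = List.replicate sz none := by
  simp [canonTbl, List.map_const']

theorem canonTbl_getElem? (sz : Nat) (S : List Int) (j : Nat) (hj : j < sz) :
    (canonTbl sz S)[j]? = some (if (j : Int) ∈ S then some (j : Int) else none) := by
  unfold canonTbl
  rw [List.getElem?_map]
  have hr : (List.range sz)[j]? = some j := by
    rw [List.getElem?_eq_getElem (by simpa using hj)]
    simp
  rw [hr]
  rfl

theorem canonTbl_set (sz : Nat) (S : List Int) (v : Int) (h0 : 0 ≤ v) (hv : v.toNat < sz)
    (hnm : v ∉ S) : (canonTbl sz S).set v.toNat (some v) = canonTbl sz (S ++ [v]) := by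
  apply List.ext_getElem (by simp [canonTbl])
  intro j h1 h2
  simp only [canonTbl, List.length_map, List.length_range] at h1 h2
  simp only [canonTbl, List.getElem_set, List.getElem_map, List.getElem_range]
  by_cases hj : v.toNat = j
  · have hjv : (j : Int) = v := by omega
    rw [if_pos hj, if_pos (by simp [hjv])]
    rw [hjv]
  · have hjv : ¬ (j : Int) = v := by omega
    rw [if_neg hj]
    by_cases hjs : (j : Int) ∈ S
    · rw [if_pos hjs, if_pos (by simp [hjs])]
    · rw [if_neg hjs, if_neg (by simp [hjs, hjv])]

theorem probe_canon (m : Nat) (S : List Int) (v : Int) (fuel : Nat) (h8 : 8 ≤ m + 1)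
    (hv : 0 ≤ v ∧ v < 8) (hS : ∀ w ∈ S, 0 ≤ w ∧ w < 8) :
    pySetProbe (canonTbl (m + 1) S) v (m + 1) ((v % ((m + 1 : Nat) : Int)).toNat) (fuel + 1)
      = canonTbl (m + 1) (PySem.Set.add S v) := by
  have hvm : v % ((m + 1 : Nat) : Int) = v := Int.emod_eq_of_lt hv.1 (by push_cast; omega)
  have hlt : v.toNat < m + 1 := by omega
  rw [hvm]
  have hent := canonTbl_getElem? (m + 1) S v.toNat hlt
  have hcoe : ((v.toNat : Nat) : Int) = v := Int.toNat_of_nonneg hv.1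
  by_cases hmem : v ∈ S
  · rw [show pySetProbe (canonTbl (m + 1) S) v (m + 1) v.toNat (fuel + 1) =
        canonTbl (m + 1) S by
      simp only [pySetProbe, hent, hcoe, if_pos hmem]
      simp]
    rw [PySem.Set.add_of_mem hmem]
  · rw [show pySetProbe (canonTbl (m + 1) S) v (m + 1) v.toNat (fuel + 1) =
        (canonTbl (m + 1) S).set v.toNat (some v) by
      simp only [pySetProbe, hent, hcoe, if_neg hmem]]
    rw [canonTbl_set _ _ _ hv.1 hlt hmem, PySem.Set.add_of_not_mem hmem]

theorem foldIns (xs : List Int) (m : Nat) (h8 : 8 ≤ m + 1) (hx : ∀ v ∈ xs, 0 ≤ v ∧ v < 8) :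
    ∀ S, (∀ w ∈ S, 0 ≤ w ∧ w < 8) →
      xs.foldl (fun t v => pySetProbe t v (m + 1) ((v % ((m + 1 : Nat) : Int)).toNat) (m + 1))
          (canonTbl (m + 1) S)
        = canonTbl (m + 1) (PySem.Set.update S xs) := by
  induction xs with
  | nil => intro S _; simp [PySem.Set.update_nil]
  | cons x xs ih =>
    intro S hS
    have hx0 : 0 ≤ x ∧ x < 8 := hx x (List.mem_cons_self)
    have hm : m + 1 = m + 1 := rfl
    rw [List.foldl_cons]
    rw [show (m + 1) = m + 1 from rfl] at *
    have hstep := probe_canon m S x m h8 hx0 hS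
    rw [show pySetProbe (canonTbl (m + 1) S) x (m + 1) ((x % ((m + 1 : Nat) : Int)).toNat) (m + 1)
        = canonTbl (m + 1) (PySem.Set.add S x) from hstep]
    rw [ih (fun v hv => hx v (List.mem_cons_of_mem _ hv)) (PySem.Set.add S x)
      (fun w hw => by
        rcases (PySem.Set.mem_add S x w).mp hw with h | h
        · exact hS w h
        · exact h ▸ hx0),
      PySem.Set.update_cons]

theorem filterMap_if (l : List Nat) (p : Nat → Prop) [DecidablePred p] (f : Nat → Int) :
    (l.filterMap (fun j => if p j then some (f j) else none))
      = (l.filter (fun j => decide (p j))).map f := by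
  induction l with
  | nil => rfl
  | cons x l ih =>
    by_cases hx : p x <;> simp [List.filter_cons, hx, ih]

theorem filterMap_canonTbl (sz : Nat) (S : List Int) (hasc : S.Pairwise (· < ·))
    (hb : ∀ v ∈ S, 0 ≤ v ∧ v < sz) : (canonTbl sz S).filterMap id = S := by
  rw [canonTbl, List.filterMap_map, Function.id_comp]
  rw [filterMap_if (List.range sz) (fun j : Nat => (j : Int) ∈ S) (fun j : Nat => (j : Int))]
  have hnd : (((List.range sz).filter (fun j : Nat => decide ((j : Int) ∈ S))).map
      (fun j : Nat => (j : Int))).Nodup := by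
    refine List.Nodup.map (fun a b h => by omega) ?_
    exact (List.nodup_range).filter _
  have hsorted : (((List.range sz).filter (fun j : Nat => decide ((j : Int) ∈ S))).map
      (fun j : Nat => (j : Int))).Pairwise (· < ·) := by
    refine List.Pairwise.map _ (fun a b h => by exact_mod_cast h) ?_
    exact (List.pairwise_lt_range).sublist List.filter_sublist
  refine List.Perm.eq_of_pairwise (fun a b _ _ hab hba => le_antisymm hab hba)
    (hsorted.imp le_of_lt) (hasc.imp le_of_lt)
    ((List.perm_ext_iff_of_nodup hnd (hasc.imp (fun h => ne_of_lt h))).mpr ?_)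
  intro v
  constructor
  · intro hv
    obtain ⟨j, hj, rfl⟩ := List.mem_map.mp hv
    exact (by simpa using (List.mem_filter.mp hj).2)
  · intro hv
    refine List.mem_map.mpr ⟨v.toNat, List.mem_filter.mpr ⟨?_, ?_⟩, Int.toNat_of_nonneg (hb v hv).1⟩
    · exact List.mem_range.mpr (by have := hb v hv; omega)
    · simpa [Int.toNat_of_nonneg (hb v hv).1] using hv

theorem pySetList_asc (xs : List Int) (h8 : ∀ v ∈ xs, 0 ≤ v ∧ v < 8)
    (hasc : (PySem.List.dedup xs).Pairwise (· < ·)) : pySetList xs = PySem.List.dedup xs := by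
  have hsz : ∃ m, 8 * 2 ^ (xs.length / 4) = m + 1 := by
    have h1 : 1 ≤ 2 ^ (xs.length / 4) := Nat.one_le_two_pow
    exact ⟨8 * 2 ^ (xs.length / 4) - 1, by omega⟩
  obtain ⟨m, hm⟩ := hsz
  have h8m : 8 ≤ m + 1 := by
    have h1 : 1 ≤ 2 ^ (xs.length / 4) := Nat.one_le_two_pow
    omega
  show (xs.foldl
      (fun t v => pySetProbe t v (8 * 2 ^ (xs.length / 4))
        ((v % ((8 * 2 ^ (xs.length / 4) : Nat) : Int)).toNat) (8 * 2 ^ (xs.length / 4)))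
      (List.replicate (8 * 2 ^ (xs.length / 4)) none)).filterMap id = PySem.List.dedup xs
  rw [hm, ← canonTbl_empty (m + 1), foldIns xs m h8m h8 [] (by simp),
    PySem.Set.update_nil_left]
  rw [show PySem.Set.ofList xs = PySem.List.dedup xs from (PySem.List.dedup_eq_ofList xs).symm]
  exact filterMap_canonTbl (m + 1) _ hasc
    (fun v hv => by
      have := h8 v ((PySem.List.mem_dedup xs v).mp hv)
      omega)

-- the one shape A feeds the set model: a strictly increasing list of small indices plus one
-- index that is either already present or beyond all of them — there the model is insertion order
theorem pySetList_append (l : List Int) (x : Int) (hl : l.Pairwise (· < ·))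
    (hb : ∀ v ∈ l, 0 ≤ v ∧ v < 8) (hx : 0 ≤ x ∧ x < 8)
    (hcomp : x ∈ l ∨ ∀ v ∈ l, v < x) : pySetList (l ++ [x]) = PySem.Set.add l x := by
  have hnd : l.Nodup := hl.imp (fun h => ne_of_lt h)
  have hded : PySem.List.dedup (l ++ [x]) = PySem.Set.add l x := by
    rw [PySem.List.dedup_eq_ofList, ofList_append_singleton l x hnd]
  have hadd : (PySem.Set.add l x).Pairwise (· < ·) := by
    rw [PySem.Set.add_eq_ite]
    rcases hcomp with hmem | hgt
    · rw [if_pos hmem]; exact hl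
    · by_cases hmem : x ∈ l
      · rw [if_pos hmem]; exact hl
      · rw [if_neg hmem]
        exact List.pairwise_append.mpr ⟨hl, List.pairwise_singleton _ _,
          fun a ha b hb => (List.mem_singleton.mp hb) ▸ hgt a ha⟩
  refine (pySetList_asc (l ++ [x]) ?_ (hded ▸ hadd)).trans hded
  intro v hv
  rcases List.mem_append.mp hv with h | h
  · exact hb v h
  · exact (List.mem_singleton.mp h) ▸ hx

-- ===== A's inner loop =====

theorem mem_matchIdx_of (E : List (Int × List (Int × Int))) (num : Int)
    (q : Int × List (Int × Int)) (hq : q ∈ E) (hm : checkMap num (PySem.Dict.mk q.2) = true) :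
    q.1 ∈ matchIdx E num :=
  List.mem_map.mpr ⟨q, List.mem_filter.mpr ⟨hq, hm⟩, rfl⟩

theorem foldA_some (E : List (Int × List (Int × Int))) (num : Int)
    (rm : PySem.Dict Int (List Int)) (l : List Int)
    (h : rm.get? num = some l) (hnd : rm.keys.Nodup)
    (hasc : l.Pairwise (· < ·)) (hb : ∀ v ∈ l, 0 ≤ v ∧ v < 8)
    (hE8 : ∀ p ∈ E, 0 ≤ p.1 ∧ p.1 < 8)
    (hEpw : (E.map (·.1)).Pairwise (· < ·))
    (hcomp : ∀ p ∈ E, checkMap num (PySem.Dict.mk p.2) = true → p.1 ∈ l ∨ ∀ v ∈ l, v < p.1) :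
    E.foldl (stepA num) rm = rm.insert num (PySem.Set.update l (matchIdx E num)) := by
  induction E generalizing rm l with
  | nil =>
    simp only [List.foldl_nil, matchIdx]
    simp only [List.filter_nil, List.map_nil, PySem.Set.update_nil]
    exact (insert_eq_self rm num l hnd h).symm
  | cons p E ih =>
    have hE8' : ∀ q ∈ E, 0 ≤ q.1 ∧ q.1 < 8 := fun q hq => hE8 q (List.mem_cons_of_mem _ hq)
    have hEpw' : (E.map (·.1)).Pairwise (· < ·) := (List.pairwise_cons.mp hEpw).2
    have hplt : ∀ q ∈ E, p.1 < q.1 := fun q hq =>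
      (List.pairwise_cons.mp hEpw).1 q.1 (List.mem_map_of_mem hq)
    rw [List.foldl_cons, matchIdx_cons]
    by_cases hm : checkMap num (PySem.Dict.mk p.2) = true
    · have hcm : checkMap num rm = true := by
        rw [checkMap_true_iff, h]; rfl
      have hgd : rm.getD num [] = l := PySem.Dict.getD_of_get?_eq_some _ [] h
      have hcp := hcomp p (List.mem_cons_self) hm
      rw [if_pos hm]
      have hstep : stepA num rm p =
          rm.insert num (PySem.Set.add l p.1) := by
        simp [stepA, hm, hcm, hgd,
          pySetList_append l p.1 hasc hb (hE8 p (List.mem_cons_self)) hcp]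
      have hasc' : (PySem.Set.add l p.1).Pairwise (· < ·) := by
        rw [PySem.Set.add_eq_ite]
        rcases hcp with hmem | hgt
        · rw [if_pos hmem]; exact hasc
        · by_cases hmem : p.1 ∈ l
          · rw [if_pos hmem]; exact hasc
          · rw [if_neg hmem]
            exact List.pairwise_append.mpr ⟨hasc, List.pairwise_singleton _ _,
              fun a ha b hbm => (List.mem_singleton.mp hbm) ▸ hgt a ha⟩
      have hb' : ∀ v ∈ PySem.Set.add l p.1, 0 ≤ v ∧ v < 8 := by
        intro v hv
        rcases (PySem.Set.mem_add l p.1 v).mp hv with hvl | hvp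
        · exact hb v hvl
        · exact hvp ▸ hE8 p (List.mem_cons_self)
      have hcomp' : ∀ q ∈ E, checkMap num (PySem.Dict.mk q.2) = true →
          q.1 ∈ PySem.Set.add l p.1 ∨ ∀ v ∈ PySem.Set.add l p.1, v < q.1 := by
        intro q hq hqm
        rcases hcomp q (List.mem_cons_of_mem _ hq) hqm with hql | hgt
        · exact Or.inl ((PySem.Set.mem_add l p.1 q.1).mpr (Or.inl hql))
        · refine Or.inr (fun v hv => ?_)
          rcases (PySem.Set.mem_add l p.1 v).mp hv with hvl | hvp
          · exact hgt v hvl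
          · exact hvp ▸ hplt q hq
      rw [hstep,
        ih (rm.insert num (PySem.Set.add l p.1)) (PySem.Set.add l p.1)
          (PySem.Dict.get?_insert_self _ _ _) (PySem.Dict.nodup_keys_insert _ _ _ hnd)
          hasc' hb' hE8' hEpw' hcomp',
        PySem.Dict.insert_insert_self, PySem.Set.update_cons]
    · rw [if_neg hm]
      have hstep : stepA num rm p = rm := by simp [stepA, hm]
      rw [hstep, ih rm l h hnd hasc hb hE8' hEpw'
        (fun q hq hqm => hcomp q (List.mem_cons_of_mem _ hq) hqm)]

theorem foldA_none (E : List (Int × List (Int × Int))) (num : Int)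
    (rm : PySem.Dict Int (List Int))
    (h : rm.get? num = none) (hnd : rm.keys.Nodup)
    (hE8 : ∀ p ∈ E, 0 ≤ p.1 ∧ p.1 < 8)
    (hEpw : (E.map (·.1)).Pairwise (· < ·)) :
    E.foldl (stepA num) rm =
      if matchIdx E num = [] then rm else rm.insert num (matchIdx E num) := by
  induction E generalizing rm with
  | nil => simp [matchIdx]
  | cons p E ih =>
    have hE8' : ∀ q ∈ E, 0 ≤ q.1 ∧ q.1 < 8 := fun q hq => hE8 q (List.mem_cons_of_mem _ hq)
    have hEpw' : (E.map (·.1)).Pairwise (· < ·) := (List.pairwise_cons.mp hEpw).2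
    have hE' : (E.map (·.1)).Nodup := hEpw'.imp (fun hab => ne_of_lt hab)
    have hplt : ∀ q ∈ E, p.1 < q.1 := fun q hq =>
      (List.pairwise_cons.mp hEpw).1 q.1 (List.mem_map_of_mem hq)
    rw [List.foldl_cons, matchIdx_cons]
    by_cases hm : checkMap num (PySem.Dict.mk p.2) = true
    · have hcm : checkMap num rm = false := by
        rw [checkMap_isSome, h]; rfl
      have hstep : stepA num rm p = rm.insert num [p.1] := by
        simp [stepA, hm, hcm]
      rw [if_pos hm, hstep,
        foldA_some E num _ [p.1] (PySem.Dict.get?_insert_self _ _ _)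
          (PySem.Dict.nodup_keys_insert _ _ _ hnd) (List.pairwise_singleton _ _)
          (fun v hv => (List.mem_singleton.mp hv) ▸ hE8 p (List.mem_cons_self))
          hE8' hEpw'
          (fun q hq _ => Or.inr (fun v hv => (List.mem_singleton.mp hv) ▸ hplt q hq)),
        PySem.Dict.insert_insert_self]
      have hdisj : ∀ x ∈ matchIdx E num, x ∉ [p.1] := by
        intro x hx
        have hxE : x ∈ E.map (·.1) := (matchIdx_sublist E num).mem hx
        simp only [List.mem_singleton]
        intro hxe
        obtain ⟨q, hq, hq1⟩ := List.mem_map.mp hxE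
        have := hplt q hq
        omega
      rw [PySem.Set.update_eq_append_of_disjoint _ _ (matchIdx_nodup E num hE') hdisj]
      simp
    · have hstep : stepA num rm p = rm := by simp [stepA, hm]
      rw [if_neg hm, hstep, ih rm h hnd hE8' hEpw']

-- invariant carried by both outer loops: every stored value is the full match list, and is nonempty
def DInv (E : List (Int × List (Int × Int))) (r : PySem.Dict Int (List Int)) : Prop :=
  r.keys.Nodup ∧ ∀ n l, r.get? n = some l → l = matchIdx E n ∧ matchIdx E n ≠ []

theorem DInv_step (E : List (Int × List (Int × Int))) (r : PySem.Dict Int (List Int))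
    (num : Int) (hI : DInv E r) (hne : matchIdx E num ≠ []) :
    DInv E (r.insert num (matchIdx E num)) := by
  refine ⟨PySem.Dict.nodup_keys_insert _ _ _ hI.1, ?_⟩
  intro n l hg
  rw [PySem.Dict.get?_insert] at hg
  by_cases hn : n = num
  · rw [if_pos hn] at hg
    subst hn
    exact ⟨by injection hg.symm, hne⟩
  · rw [if_neg hn] at hg
    exact hI.2 n l hg

-- A's outer loop equals the canonical loop
theorem foldA_eq_foldC (E : List (Int × List (Int × Int))) (inputs : List Int)
    (rm : PySem.Dict Int (List Int))
    (hE8 : ∀ p ∈ E, 0 ≤ p.1 ∧ p.1 < 8)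
    (hEpw : (E.map (·.1)).Pairwise (· < ·)) (hI : DInv E rm) :
    inputs.foldl (fun rm num => E.foldl (stepA num) rm) rm = inputs.foldl (stepC E) rm := by
  have hE : (E.map (·.1)).Nodup := hEpw.imp (fun hab => ne_of_lt hab)
  induction inputs generalizing rm with
  | nil => rfl
  | cons num inputs ih =>
    rw [List.foldl_cons, List.foldl_cons]
    have hone : E.foldl (stepA num) rm = stepC E rm num := by
      cases hg : rm.get? num with
      | none =>
        rw [foldA_none E num rm hg hI.1 hE8 hEpw]; rfl
      | some l =>
        obtain ⟨hl, hne⟩ := hI.2 num l hg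
        subst hl
        have hasc : (matchIdx E num).Pairwise (· < ·) :=
          hEpw.sublist (matchIdx_sublist E num)
        have hb : ∀ v ∈ matchIdx E num, 0 ≤ v ∧ v < 8 := by
          intro v hv
          obtain ⟨q, hq, rfl⟩ := List.mem_map.mp hv
          exact hE8 q (List.mem_of_mem_filter hq)
        have hcomp : ∀ p ∈ E, checkMap num (PySem.Dict.mk p.2) = true →
            p.1 ∈ matchIdx E num ∨ ∀ v ∈ matchIdx E num, v < p.1 :=
          fun p hp hm => Or.inl (mem_matchIdx_of E num p hp hm)
        rw [foldA_some E num rm _ hg hI.1 hasc hb hE8 hEpw hcomp, update_self, stepC,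
          if_neg hne]
    rw [hone]
    apply ih
    unfold stepC
    by_cases hne : matchIdx E num = []
    · rwa [if_pos hne]
    · rw [if_neg hne]
      exact DInv_step E rm num hI hne

-- ===== B's bucket loop =====

theorem inner_getD (ks : List Int) (idx : Int) (b : PySem.Dict Int (List Int)) (c : Int) :
    (ks.foldl (fun b k => b.modify k [] (· ++ [idx])) b).getD c [] =
      b.getD c [] ++ List.replicate (ks.count c) idx := by
  induction ks generalizing b with
  | nil => simp
  | cons k ks ih =>
    rw [List.foldl_cons, ih]
    by_cases hk : k = c
    · subst hk
      rw [PySem.Dict.getD_modify_self]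
      simp [List.replicate_succ]
    · rw [PySem.Dict.getD_modify_of_ne _ _ _ (fun h => hk h.symm)]
      simp [hk]

theorem inner_contains (ks : List Int) (idx : Int) (b : PySem.Dict Int (List Int)) (c : Int) :
    ((ks.foldl (fun b k => b.modify k [] (· ++ [idx])) b).contains c) =
      (b.contains c || decide (c ∈ ks)) := by
  induction ks generalizing b with
  | nil => simp
  | cons k ks ih =>
    rw [List.foldl_cons, ih, PySem.Dict.contains_modify]
    by_cases hk : c = k
    · simp [hk]
    · have hb : (c == k) = false := by simpa using hk
      simp [hk, hb]

theorem count_dedup_fst (s : List (Int × Int)) (c : Int) :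
    (PySem.List.dedup (s.map Prod.fst)).count c =
      if checkMap c (PySem.Dict.mk s) then 1 else 0 := by
  by_cases h : checkMap c (PySem.Dict.mk s) = true
  · rw [if_pos h]
    have hm : c ∈ PySem.List.dedup (s.map Prod.fst) :=
      (PySem.List.mem_dedup _ _).mpr ((checkMap_mk_iff s c).mp h)
    exact List.count_eq_one_of_mem (PySem.List.nodup_dedup _) hm
  · rw [if_neg h]
    have hm : c ∉ PySem.List.dedup (s.map Prod.fst) := by
      rw [PySem.List.mem_dedup _ _]
      intro hc
      exact h ((checkMap_mk_iff s c).mpr hc)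
    exact List.count_eq_zero_of_not_mem hm

theorem buckets_getD (E : List (Int × List (Int × Int))) (c : Int)
    (b : PySem.Dict Int (List Int)) :
    (E.foldl stepB b).getD c [] = b.getD c [] ++ matchIdx E c := by
  induction E generalizing b with
  | nil => simp [matchIdx]
  | cons p E ih =>
    rw [List.foldl_cons, ih, matchIdx_cons]
    unfold stepB
    rw [inner_getD, count_dedup_fst]
    by_cases hm : checkMap c (PySem.Dict.mk p.2) = true <;> simp [hm]

theorem dedup_mem_decide (s : List (Int × Int)) (c : Int) :
    decide (c ∈ PySem.List.dedup (s.map Prod.fst)) = checkMap c (PySem.Dict.mk s) := by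
  by_cases h : checkMap c (PySem.Dict.mk s) = true
  · rw [h, decide_eq_true_iff]
    exact (PySem.List.mem_dedup _ _).mpr ((checkMap_mk_iff s c).mp h)
  · rw [eq_false_of_ne_true h, decide_eq_false_iff_not, PySem.List.mem_dedup _ _]
    exact fun hc => h ((checkMap_mk_iff s c).mpr hc)

theorem buckets_contains (E : List (Int × List (Int × Int))) (c : Int)
    (b : PySem.Dict Int (List Int)) :
    (E.foldl stepB b).contains c = (b.contains c || decide (matchIdx E c ≠ [])) := by
  induction E generalizing b with
  | nil => simp [matchIdx]
  | cons p E ih =>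
    rw [List.foldl_cons, ih, matchIdx_cons]
    unfold stepB
    rw [inner_contains, dedup_mem_decide]
    by_cases hm : checkMap c (PySem.Dict.mk p.2) = true
    · simp [hm]
    · simp [eq_false_of_ne_true hm]

-- B's result loop equals the canonical loop
theorem foldB_eq_foldC (E : List (Int × List (Int × Int))) (inputs : List Int)
    (r : PySem.Dict Int (List Int)) (hI : DInv E r) :
    inputs.foldl (fun r num =>
        if !(r.contains num) && (E.foldl stepB PySem.Dict.empty).contains num then
          r.insert num ((E.foldl stepB PySem.Dict.empty).getD num [])
        else r) r
      = inputs.foldl (stepC E) r := by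
  induction inputs generalizing r with
  | nil => rfl
  | cons num inputs ih =>
    rw [List.foldl_cons, List.foldl_cons]
    have hbc : (E.foldl stepB PySem.Dict.empty).contains num
        = decide (matchIdx E num ≠ []) := by
      rw [buckets_contains]
      simp
    have hbg : (E.foldl stepB PySem.Dict.empty).getD num [] = matchIdx E num := by
      rw [buckets_getD]
      simp
    have hone : (if !(r.contains num) && (E.foldl stepB PySem.Dict.empty).contains num then
          r.insert num ((E.foldl stepB PySem.Dict.empty).getD num [])
        else r) = stepC E r num := by
      cases hg : r.get? num with
      | none =>
        have hc : r.contains num = false := by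
          rw [PySem.Dict.contains_eq_isSome_get?, hg]; rfl
        rw [hc, hbc, hbg]
        unfold stepC
        by_cases hne : matchIdx E num = [] <;> simp [hne]
      | some l =>
        obtain ⟨hl, hne⟩ := hI.2 num l hg
        subst hl
        have hc : r.contains num = true := by
          rw [PySem.Dict.contains_eq_isSome_get?, hg]; rfl
        rw [hc]
        unfold stepC
        rw [if_neg hne]
        simp [insert_eq_self r num _ hI.1 hg]
    rw [hone]
    apply ih
    unfold stepC
    by_cases hne : matchIdx E num = []
    · rwa [if_pos hne]
    · rw [if_neg hne]
      exact DInv_step E r num hI hne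

theorem DInv_empty (E : List (Int × List (Int × Int))) : DInv E PySem.Dict.empty := by
  refine ⟨by simp, ?_⟩
  intro n l hg
  rw [PySem.Dict.get?_empty] at hg
  exact absurd hg (by simp)

theorem enumerate_fst_pairwise (setC : List (List (Int × Int))) :
    ((PySem.List.enumerate setC).map (·.1)).Pairwise (· < ·) :=
  (List.pairwise_map).mpr (PySem.List.pairwise_lt_enumerate setC 0)

-- ===== VERDICT (by name: the statement is the Claim_ definition above) =====
theorem allInSet_spec : Claim_equal_allInSet := by
  intro setC inputs _ hpre
  unfold Pre_allInSet at hpre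
  have hE8 : ∀ p ∈ PySem.List.enumerate setC, 0 ≤ p.1 ∧ p.1 < 8 := by
    intro p hp
    obtain ⟨k, hk, rfl⟩ := (PySem.List.mem_enumerate_iff _ _ _).mp hp
    exact ⟨by dsimp only; omega, by dsimp only; omega⟩
  unfold Spec_allInSet
  have hB : allInSet_alt setC inputs = (inputs.foldl (fun r num =>
      if !(r.contains num) &&
          ((PySem.List.enumerate setC).foldl stepB PySem.Dict.empty).contains num then
        r.insert num (((PySem.List.enumerate setC).foldl stepB PySem.Dict.empty).getD num [])
      else r) PySem.Dict.empty).items := rfl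
  rw [allInSet, hB, foldA_eq_foldC _ _ _ hE8 (enumerate_fst_pairwise setC) (DInv_empty _),
    foldB_eq_foldC _ _ _ (DInv_empty _)]
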